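-- pv_equiv track=rewrite | github.com/akila-UCD/AutoDFBench | API/deleted_file_recovery.py | find_name_row
-- ===== SOURCE A (Python) =====
-- def names_equal(sub_name: str, gt_name: str, file_system: str) -> bool:
--     """
--     Name equivalence used for:
--       - Match counter
--       - F1 Name+Size rule
--       - Weighted scoring 'name' component
--     Rule:
--       * For FAT (case-insensitive), ignore the first character and compare the remainder.
--       * For others, compare exact string equality.
--     """
--     if sub_name is None or gt_name is None:
--         return False
--     s = str(sub_name).strip()
--     g = str(gt_name).strip()
--     if file_system and str(file_system).upper() == "FAT":
--         if len(s) == 0 or len(g) == 0: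
--             return False
--         return s[1:].upper() == g[1:].upper()
--     return s == g
--
-- def find_name_row(filename: str, gt_rows: list, file_system: str):
--     """
--     Return a GT row matched by name according to names_equal().
--     Preference: exact string equality first; otherwise apply names_equal (FAT first-char-ignored).
--     """
--     if filename is None:
--         return None
--     # exact match first
--     for r in gt_rows:
--         if filename == r["filename"]:
--             return r
--     # relaxed match (e.g., FAT ignore first char)
--     for r in gt_rows:
--         if names_equal(filename, r["filename"], file_system):
--             return r
--     return None
-- ===== SOURCE B (Python) =====
-- def names_equal(sub_name: str, gt_name: str, file_system: str) -> bool: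
--     if sub_name is None or gt_name is None:
--         return False
--     s = str(sub_name).strip()
--     g = str(gt_name).strip()
--     if file_system and str(file_system).upper() == "FAT":
--         if len(s) == 0 or len(g) == 0:
--             return False
--         return s[1:].upper() == g[1:].upper()
--     return s == g
--
-- def find_name_row(filename: str, gt_rows: list, file_system: str):
--     # Single pass: exact match returns immediately; first relaxed match is
--     # remembered and returned only if no exact match exists anywhere.
--     if filename is None:
--         return None
--     relaxed = None
--     for r in gt_rows:
--         name = r["filename"]
--         if filename == name:
--             return r
--         if relaxed is None and names_equal(filename, name, file_system):
--             relaxed = r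
--     return relaxed
-- ===== Notes on version B (the rewrite author's own statement) =====
-- stated objective: alternative
-- what changed: Merged A's two sequential scans (exact pass, then relaxed pass) into one scan that returns on an exact hit and remembers the first relaxed hit for the end.
import Mathlib
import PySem

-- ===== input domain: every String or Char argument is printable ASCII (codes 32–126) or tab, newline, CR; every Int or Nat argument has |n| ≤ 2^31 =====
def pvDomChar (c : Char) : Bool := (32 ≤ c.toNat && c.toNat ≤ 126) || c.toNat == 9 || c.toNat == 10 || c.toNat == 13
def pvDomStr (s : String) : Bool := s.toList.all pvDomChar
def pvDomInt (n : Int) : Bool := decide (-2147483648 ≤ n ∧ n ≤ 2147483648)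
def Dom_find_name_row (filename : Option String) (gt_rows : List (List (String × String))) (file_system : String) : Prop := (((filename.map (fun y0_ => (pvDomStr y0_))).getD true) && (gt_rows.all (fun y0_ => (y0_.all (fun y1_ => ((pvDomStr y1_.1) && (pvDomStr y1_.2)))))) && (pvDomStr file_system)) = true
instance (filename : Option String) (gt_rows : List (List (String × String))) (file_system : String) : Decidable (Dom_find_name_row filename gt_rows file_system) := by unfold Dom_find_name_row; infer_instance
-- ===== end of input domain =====

-- B merges A's two sequential scans into one pass (exact hit returns at once,
-- first relaxed hit is remembered); alternative decomposition, same result.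

-- ===== PORT A =====
-- names_equal: at both call sites the arguments are genuine strings (filename
-- was checked for None; r["filename"] is a dict value), so the None branch is
-- dropped and the parameters are Strings.
def names_equal (sub_name gt_name file_system : String) : Bool :=
  let s := PySem.Str.strip sub_name
  let g := PySem.Str.strip gt_name
  if file_system ≠ "" && PySem.Str.upper file_system == "FAT" then
    if PySem.Str.len s == 0 || PySem.Str.len g == 0 then false
    else PySem.Str.upper (PySem.Str.slice s (some 1) none) == PySem.Str.upper (PySem.Str.slice g (some 1) none)
  else s == g

-- first loop of A: exact match (r["filename"] ported via getD ""; Pre_ ensures the key exists)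
def exactLoop (f : String) (rows : List (List (String × String))) : Option (List (String × String)) :=
  match rows with
  | [] => none
  | r :: rs => if f == (PySem.Dict.mk r).getD "filename" "" then some r else exactLoop f rs

-- second loop of A: relaxed match via names_equal
def relaxLoop (f fs : String) (rows : List (List (String × String))) : Option (List (String × String)) :=
  match rows with
  | [] => none
  | r :: rs => if names_equal f ((PySem.Dict.mk r).getD "filename" "") fs then some r else relaxLoop f fs rs

def find_name_row (filename : Option String) (gt_rows : List (List (String × String))) (file_system : String) : Option (List (String × String)) :=
  match filename with
  | none => none
  | some f =>
    match exactLoop f gt_rows with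
    | some r => some r
    | none => relaxLoop f file_system gt_rows

-- ===== PORT B =====
-- single pass: return r on exact match, remember the first relaxed match
def altLoop (f fs : String) (rows : List (List (String × String))) (relaxed : Option (List (String × String))) : Option (List (String × String)) :=
  match rows with
  | [] => relaxed
  | r :: rs =>
    let name := (PySem.Dict.mk r).getD "filename" ""
    if f == name then some r
    else altLoop f fs rs (if relaxed.isNone && names_equal f name fs then some r else relaxed)

def find_name_row_alt (filename : Option String) (gt_rows : List (List (String × String))) (file_system : String) : Option (List (String × String)) :=
  match filename with
  | none => none
  | some f => altLoop f file_system gt_rows none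

-- ===== PRECONDITION & SPEC =====
-- Pre_ excludes rows lacking a "filename" key (when filename is not None), on
-- which Python's r["filename"] raises KeyError in both A and B unless an exact
-- match is returned before the first such row is reached.
def Pre_find_name_row (filename : Option String) (gt_rows : List (List (String × String))) (file_system : String) : Prop :=
  filename = none ∨ ∀ r ∈ gt_rows, (PySem.Dict.mk r).contains "filename" = true
instance (filename : Option String) (gt_rows : List (List (String × String))) (file_system : String) : Decidable (Pre_find_name_row filename gt_rows file_system) := by unfold Pre_find_name_row; infer_instance
def pvWitness_find_name_row : Option String × (List (List (String × String))) × String := (some "a", [[("filename", "a")]], "NTFS")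

def Spec_find_name_row (filename : Option String) (gt_rows : List (List (String × String))) (file_system : String) (out : Option (List (String × String))) : Prop := out = find_name_row_alt filename gt_rows file_system
instance (filename : Option String) (gt_rows : List (List (String × String))) (file_system : String) (out : Option (List (String × String))) : Decidable (Spec_find_name_row filename gt_rows file_system out) := by unfold Spec_find_name_row; infer_instance

-- ===== CLAIM (what is proved, stated in full; the proofs are below) =====
def Claim_equal_find_name_row : Prop := ∀ (filename : Option String) (gt_rows : List (List (String × String))) (file_system : String), Dom_find_name_row filename gt_rows file_system → Pre_find_name_row filename gt_rows file_system → Spec_find_name_row filename gt_rows file_system (find_name_row filename gt_rows file_system)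

-- ===== LEMMAS AND PROOFS =====

-- invariant of B's single pass: it is A's exact scan, falling back to the
-- remembered candidate, falling back to A's relaxed scan
lemma altLoop_eq (f fs : String) : ∀ (rows : List (List (String × String))) (relaxed : Option (List (String × String))),
    altLoop f fs rows relaxed = (exactLoop f rows).or (relaxed.or (relaxLoop f fs rows)) := by
  intro rows
  induction rows with
  | nil => intro relaxed; simp [altLoop, exactLoop, relaxLoop]
  | cons r rs ih =>
    intro relaxed
    simp only [altLoop, exactLoop, relaxLoop]
    by_cases hx : f == (PySem.Dict.mk r).getD "filename" ""
    · simp [hx]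
    · simp only [hx, ih]
      cases relaxed with
      | some x => simp
      | none =>
        by_cases hr : names_equal f ((PySem.Dict.mk r).getD "filename" "") fs <;> simp [hr]

-- ===== VERDICT (by name: the statement is the Claim_ definition above) =====
theorem find_name_row_spec : Claim_equal_find_name_row := by
  intro filename gt_rows file_system _ _
  unfold Spec_find_name_row find_name_row find_name_row_alt
  cases filename with
  | none => rfl
  | some f =>
    simp only [altLoop_eq]
    cases exactLoop f gt_rows <;> simp
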